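-- pv_equiv track=rewrite | github.com/alitourani/computational-intelligence-class-9801 | 24-tic-tac-toe-neural-networks/tictactoe.py | bitboard_to_list
-- ===== SOURCE A (Python) =====
-- def bitboard_to_list(board):
--     squares = []
--     square = 256  # Bottom right corner.
--     while square:
--         squares.append(int(square & board != 0))
--         square = square >> 1
--     assert len(squares) == 9
--     return squares
-- ===== SOURCE B (Python) =====
-- def bitboard_to_list(board):
--     squares = [int(c) for c in format(board & 0x1FF, '09b')]
--     assert len(squares) == 9
--     return squares
-- ===== Notes on version B (the rewrite author's own statement) =====
-- stated objective: idiomatic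
-- what changed: Replaces the bit-masking while-loop with masking to the low 9 bits, string-formatting them as a 9-digit binary string, and mapping each character to an int.
import Mathlib
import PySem

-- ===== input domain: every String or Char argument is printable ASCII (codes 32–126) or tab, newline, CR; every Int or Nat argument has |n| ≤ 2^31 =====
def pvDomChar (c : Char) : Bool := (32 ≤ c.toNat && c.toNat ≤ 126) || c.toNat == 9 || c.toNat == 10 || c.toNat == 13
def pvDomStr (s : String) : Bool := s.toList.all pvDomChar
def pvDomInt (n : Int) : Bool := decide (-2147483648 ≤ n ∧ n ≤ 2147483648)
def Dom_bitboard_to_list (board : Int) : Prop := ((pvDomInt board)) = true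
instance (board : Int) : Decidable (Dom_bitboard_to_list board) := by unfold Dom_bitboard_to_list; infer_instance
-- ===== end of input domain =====

-- B replaces A's bit-masking while-loop by masking to the low 9 bits, formatting them
-- as a 9-character binary string, and mapping each character to an int (idiomatic; same cost).

-- ===== PORT A =====
-- the while-loop: square runs 256, 128, …, 1; each step appends int(square & board != 0)
def pvLoopA (board : Int) (square : Nat) : Nat → List Int
  | 0 => []
  | fuel + 1 =>
    if square = 0 then []
    else (if PySem.Int.band (square : Int) board ≠ 0 then (1 : Int) else 0) :: pvLoopA board (square / 2) fuel

-- fuel 10 is exact: square halves 256, 128, …, 1, 0, so the loop runs 9 times and stops;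
-- the assert len(squares) == 9 always succeeds
def bitboard_to_list (board : Int) : List Int := pvLoopA board 256 10

-- ===== PORT B =====
-- format(m, '09b') for m < 512: the 9 binary digits of m, most significant first
def pvFormat09b (m : Nat) : List Char :=
  (List.range 9).map (fun i => if m.testBit (8 - i) then '1' else '0')

-- the assert len(squares) == 9 always succeeds (the formatted string has 9 characters)
def bitboard_to_list_alt (board : Int) : List Int :=
  (pvFormat09b (PySem.Int.band board 511).toNat).map (fun c => if c = '1' then (1 : Int) else 0)

-- ===== PRECONDITION & SPEC =====
def Spec_bitboard_to_list (board : Int) (out : List Int) : Prop := out = bitboard_to_list_alt board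
instance (board : Int) (out : List Int) : Decidable (Spec_bitboard_to_list board out) := by unfold Spec_bitboard_to_list; infer_instance

-- ===== CLAIM (what is proved, stated in full; the proofs are below) =====
def Claim_equal_bitboard_to_list : Prop := ∀ (board : Int), Dom_bitboard_to_list board → Spec_bitboard_to_list board (bitboard_to_list board)

-- ===== LEMMAS AND PROOFS =====

-- masking with 511 below a small left operand is invisible
lemma pv_and_mask (s b : Nat) (h : s < 512) : s &&& (b &&& 511) = s &&& b := by
  apply Nat.eq_of_testBit_eq
  intro i
  by_cases hi : i < 9
  · have h511 : (511 : Nat).testBit i = true := by interval_cases i <;> decide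
    simp [Nat.testBit_and, h511]
  · have hs : s.testBit i = false := by
      apply Nat.testBit_lt_two_pow
      calc s < 512 := h
        _ = 2 ^ 9 := by norm_num
        _ ≤ 2 ^ i := Nat.pow_le_pow_right (by norm_num) (by omega)
    simp [Nat.testBit_and, hs]

-- Python's s & board for nonnegative s and negative board = Int.negSucc t
lemma pv_band_negSucc (a : Int) (t : Nat) (h : 0 ≤ a) :
    PySem.Int.band a (Int.negSucc t) = ((a.toNat - (a.toNat &&& t) : Nat) : Int) := by
  have h1 : ¬ (0 : Int) ≤ Int.negSucc t := by simp
  simp [PySem.Int.band, h, h1]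

lemma pv_A_pos (b : Nat) : bitboard_to_list (b : Int) = bitboard_to_list ((b &&& 511 : Nat) : Int) := by
  simp [bitboard_to_list, pvLoopA, PySem.Int.band_of_nonneg, pv_and_mask]

lemma pv_B_pos (b : Nat) : bitboard_to_list_alt (b : Int) = bitboard_to_list_alt ((b &&& 511 : Nat) : Int) := by
  simp [bitboard_to_list_alt, PySem.Int.band_of_nonneg]

lemma pv_A_neg (t : Nat) : bitboard_to_list (Int.negSucc t) = bitboard_to_list (Int.negSucc (t &&& 511)) := by
  simp [bitboard_to_list, pvLoopA, pv_band_negSucc, pv_and_mask]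

lemma pv_B_neg (t : Nat) : bitboard_to_list_alt (Int.negSucc t) = bitboard_to_list_alt (Int.negSucc (t &&& 511)) := by
  have e : ∀ u : Nat, PySem.Int.band (Int.negSucc u) 511 = ((511 - (511 &&& u) : Nat) : Int) := by
    intro u; rw [PySem.Int.band_comm]; simpa using pv_band_negSucc 511 u (by norm_num)
  rw [bitboard_to_list_alt, bitboard_to_list_alt, e, e]
  have h : (511 : Nat) &&& (t &&& 511) = 511 &&& t := pv_and_mask 511 t (by norm_num)
  rw [h]

set_option maxRecDepth 40000 in
lemma pv_small_pos : ∀ n : Fin 512, bitboard_to_list ((n : Nat) : Int) = bitboard_to_list_alt ((n : Nat) : Int) := by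
  decide

set_option maxRecDepth 40000 in
lemma pv_small_neg : ∀ n : Fin 512, bitboard_to_list (Int.negSucc (n : Nat)) = bitboard_to_list_alt (Int.negSucc (n : Nat)) := by
  decide

-- ===== VERDICT (by name: the statement is the Claim_ definition above) =====
theorem bitboard_to_list_spec : Claim_equal_bitboard_to_list := by
  intro board _
  unfold Spec_bitboard_to_list
  cases board with
  | ofNat b =>
      have hb : (Int.ofNat b) = ((b : Nat) : Int) := rfl
      rw [hb, pv_A_pos, pv_B_pos]
      exact pv_small_pos ⟨b &&& 511, by have : b &&& 511 ≤ 511 := Nat.and_le_right; omega⟩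
  | negSucc t =>
      rw [pv_A_neg, pv_B_neg]
      exact pv_small_neg ⟨t &&& 511, by have : t &&& 511 ≤ 511 := Nat.and_le_right; omega⟩
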